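-- pv_equiv track=rewrite | github.com/jerovernay/Practicas | Parciales/python/Parcial05.py | un_responsable_por_turno
-- ===== SOURCE A (Python) =====
-- def un_responsable_por_turno(grilla_horaria: list[list[str]]) -> list[(bool, bool)]:
--     responsables: list[(bool, bool)] = []
--     num_filas = len(grilla_horaria) #8
--     num_columnas = len(grilla_horaria[0]) # solo miras la primera
--
--     for columna in range(num_columnas):
--                                     # Unica puta forma de hacerlo (creo, obvio), estoy re caliente
--         contadorAM = {}             # la idea es ir metiendo a ver si el fracasado que decidio laburar ahi cumplio el turno de mierda
--         contadorPM = {}             # es decir, se crea clave como el chabon y valor las veces que el chabon aparece en la fila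
--
--         for fila in range(num_filas // 2):
--             fracasado = grilla_horaria[fila][columna]
--
--             if fracasado in contadorAM:
--                 contadorAM[fracasado] += 1
--             else:
--                 contadorAM[fracasado] = 1
--
--         for fila in range(num_filas // 2 , num_filas):
--             estupido = grilla_horaria[fila][columna]
--
--             if estupido in contadorPM:
--                 contadorPM[estupido] += 1
--             else:
--                 contadorPM[estupido] = 1
--
--
--         cumplioAM = False
--         for fraca, veces in contadorAM.items():
--             if veces == 4:
--                 cumplioAM = True
--                 break
--
--         cumplioFM = False
--         for estupi, veces in contadorPM.items():
--             if veces == 4: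
--                 cumplioFM = True
--                 break
--
--         responsables.append((cumplioAM, cumplioFM))
--
--     return responsables
-- ===== SOURCE B (Python) =====
-- def un_responsable_por_turno(grilla_horaria: list[list[str]]) -> list[(bool, bool)]:
--     n = len(grilla_horaria)
--     num_columnas = len(grilla_horaria[0])
--     h = n // 2
--
--     def hay_run_de_4(vals):
--         # sort the values; equal names become contiguous runs, flag a run of exactly 4
--         s = sorted(vals)
--         i = 0
--         while i < len(s):
--             j = i
--             while j < len(s) and s[j] == s[i]:
--                 j += 1
--             if j - i == 4:
--                 return True
--             i = j
--         return False
--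
--     resultado = []
--     for c in range(num_columnas):
--         top = [grilla_horaria[r][c] for r in range(h)]
--         bottom = [grilla_horaria[r][c] for r in range(h, n)]
--         resultado.append((hay_run_de_4(top), hay_run_de_4(bottom)))
--     return resultado
-- ===== Notes on version B (the rewrite author's own statement) =====
-- stated objective: alternative
-- what changed: Per column A builds a hash-map counter for each half and scans its items for a value of 4; B extracts each half-column as a slice, sorts it and scans consecutive runs, flagging a run of exactly length 4 — same result, no dictionaries.
-- outside the precondition, e.g. on un_responsable_por_turno([]): A raises IndexError, B raises IndexError; on un_responsable_por_turno([['a', 'b'], ['a']]): A raises IndexError, B raises IndexError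
import Mathlib
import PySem

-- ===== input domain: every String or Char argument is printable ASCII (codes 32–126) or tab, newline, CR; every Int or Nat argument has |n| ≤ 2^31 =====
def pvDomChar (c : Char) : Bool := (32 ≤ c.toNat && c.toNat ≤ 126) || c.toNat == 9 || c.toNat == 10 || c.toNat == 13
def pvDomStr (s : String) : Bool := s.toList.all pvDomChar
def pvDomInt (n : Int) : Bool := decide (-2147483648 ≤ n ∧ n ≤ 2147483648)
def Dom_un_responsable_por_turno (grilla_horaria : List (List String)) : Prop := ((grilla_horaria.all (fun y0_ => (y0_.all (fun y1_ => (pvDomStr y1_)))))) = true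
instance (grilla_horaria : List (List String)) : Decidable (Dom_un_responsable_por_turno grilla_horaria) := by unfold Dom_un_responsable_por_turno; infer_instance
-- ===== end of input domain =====

-- B replaces A's per-column hash-map counting with sort-then-run-length scanning of each half-slice (alternative decomposition, same observable result).


-- ===== PORT A =====
-- the items-scan with break: first item with value 4 sets the flag
def pvScan4 : List (String × Int) → Bool
  | [] => false
  | (_, v) :: rest => if v == 4 then true else pvScan4 rest

-- one counting loop 'for fila in range(lo, hi): … contador[...] += 1 / = 1'
def pvCountLoop (grilla : List (List String)) (columna lo hi : Int) : PySem.Dict String Int :=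
  (PySem.List.pyRange lo hi 1).foldl
    (fun d fila =>
      let x := PySem.List.pyGetD (PySem.List.pyGetD grilla fila []) columna ""
      if d.contains x then d.insert x (d.getD x 0 + 1) else d.insert x 1)
    PySem.Dict.empty

def un_responsable_por_turno (grilla_horaria : List (List String)) : List (Bool × Bool) :=
  let num_filas : Int := grilla_horaria.length
  let num_columnas : Int := (PySem.List.pyGetD grilla_horaria 0 []).length
  (PySem.List.pyRange 0 num_columnas 1).foldl
    (fun responsables columna =>
      let contadorAM := pvCountLoop grilla_horaria columna 0 (PySem.Int.floordiv num_filas 2)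
      let contadorPM := pvCountLoop grilla_horaria columna (PySem.Int.floordiv num_filas 2) num_filas
      let cumplioAM := pvScan4 contadorAM.items
      let cumplioFM := pvScan4 contadorPM.items
      responsables ++ [(cumplioAM, cumplioFM)])
    []

-- ===== PORT B =====
-- termination helper for the run scan (cited by decreasing_by)
theorem pvDropWhile_len_lt {α : Type} (p : α → Bool) (x : α) (rest : List α) :
    (rest.dropWhile p).length < (x :: rest).length :=
  Nat.lt_succ_of_le (List.length_dropWhile_le p rest)

-- the while-loop over the sorted list: advance past the current run, flag a run of exactly 4
def pvRunFlag : List String → Bool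
  | [] => false
  | x :: rest =>
    if (rest.takeWhile (fun y => y == x)).length + 1 == 4 then true
    else pvRunFlag (rest.dropWhile (fun y => y == x))
termination_by l => l.length
decreasing_by exact pvDropWhile_len_lt _ _ _

def pvHayRun4 (vals : List String) : Bool :=
  pvRunFlag (PySem.List.sorted vals (fun x => x) false)

def un_responsable_por_turno_alt (grilla_horaria : List (List String)) : List (Bool × Bool) :=
  let n : Int := grilla_horaria.length
  let num_columnas : Int := (PySem.List.pyGetD grilla_horaria 0 []).length
  let h : Int := PySem.Int.floordiv n 2
  (PySem.List.pyRange 0 num_columnas 1).map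
    (fun c =>
      let top := (PySem.List.pyRange 0 h 1).map (fun r => PySem.List.pyGetD (PySem.List.pyGetD grilla_horaria r []) c "")
      let bottom := (PySem.List.pyRange h n 1).map (fun r => PySem.List.pyGetD (PySem.List.pyGetD grilla_horaria r []) c "")
      (pvHayRun4 top, pvHayRun4 bottom))

-- ===== PRECONDITION & SPEC =====
-- Pre_ excludes exactly the inputs where A raises IndexError: the empty grid
-- (grilla_horaria[0]) and grids where some row is shorter than row 0.
def Pre_un_responsable_por_turno (grilla_horaria : List (List String)) : Prop :=
  grilla_horaria ≠ [] ∧ ∀ row ∈ grilla_horaria, (grilla_horaria.headD []).length ≤ row.length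
instance (grilla_horaria : List (List String)) : Decidable (Pre_un_responsable_por_turno grilla_horaria) := by unfold Pre_un_responsable_por_turno; infer_instance

def pvWitness_un_responsable_por_turno : List (List String) :=
  [["a", "b"], ["a", "b"], ["a", "c"], ["a", "b"], ["x", "y"], ["x", "y"], ["x", "y"], ["x", "y"]]

def Spec_un_responsable_por_turno (grilla_horaria : List (List String)) (out : List (Bool × Bool)) : Prop := out = un_responsable_por_turno_alt grilla_horaria
instance (grilla_horaria : List (List String)) (out : List (Bool × Bool)) : Decidable (Spec_un_responsable_por_turno grilla_horaria out) := by unfold Spec_un_responsable_por_turno; infer_instance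

-- ===== CLAIM (what is proved, stated in full; the proofs are below) =====
def Claim_equal_un_responsable_por_turno : Prop := ∀ (grilla_horaria : List (List String)), Dom_un_responsable_por_turno grilla_horaria → Pre_un_responsable_por_turno grilla_horaria → Spec_un_responsable_por_turno grilla_horaria (un_responsable_por_turno grilla_horaria)

-- ===== LEMMAS AND PROOFS =====

-- canonical meaning of both half-shift flags: some name occurs exactly 4 times
def pvHasCount4 (xs : List String) : Bool := xs.any (fun z => xs.count z == 4)

theorem pvScan4_eq_any (l : List (String × Int)) : pvScan4 l = l.any (fun p => p.2 == 4) := by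
  induction l with
  | nil => rfl
  | cons p rest ih => cases p; simp [pvScan4, ih, Bool.beq_eq_decide_eq]

theorem pvCountLoop_eq_counter (grilla : List (List String)) (c lo hi : Int) :
    pvCountLoop grilla c lo hi =
      PySem.Dict.counter ((PySem.List.pyRange lo hi 1).map
        (fun r => PySem.List.pyGetD (PySem.List.pyGetD grilla r []) c "")) := by
  rw [pvCountLoop, PySem.Dict.counter_eq_foldl, List.foldl_map]
  have hstep : ∀ (d : PySem.Dict String Int) (x : String),
      (if d.contains x then d.insert x (d.getD x 0 + 1) else d.insert x 1) =
      d.modify x 0 (· + 1) := by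
    intro d x
    by_cases h : d.contains x = true
    · simp [PySem.Dict.modify, h]
    · have h0 : d.getD x 0 = 0 := by
        have : d.get? x = none := by
          rw [PySem.Dict.contains_eq_isSome_get?] at h
          cases hg : d.get? x <;> simp [hg] at h ⊢
        simp [PySem.Dict.getD, this]
      simp [PySem.Dict.modify, h, h0]
  simp only [hstep]

theorem pvScan4_counter (xs : List String) :
    pvScan4 (PySem.Dict.counter xs).items = pvHasCount4 xs := by
  rw [pvScan4_eq_any, PySem.Dict.items_counter, List.any_map, pvHasCount4]
  apply Bool.eq_iff_iff.mpr
  simp only [List.any_eq_true, PySem.Set.mem_ofList, Function.comp, beq_iff_eq]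
  constructor
  · rintro ⟨z, hz, h4⟩
    exact ⟨z, hz, by exact_mod_cast h4⟩
  · rintro ⟨z, hz, h4⟩
    exact ⟨z, hz, by exact_mod_cast h4⟩

-- in a ≤-sorted list starting with x, x's multiplicity is the head run's length
theorem pvCount_head_run (x : String) (rest : List String) (h : (x :: rest).Pairwise (· ≤ ·)) :
    x ∉ rest.dropWhile (fun y => y == x) ∧
      (x :: rest).count x = (rest.takeWhile (fun y => y == x)).length + 1 := by
  have hnm : x ∉ rest.dropWhile (fun y => y == x) := by
    induction rest with
    | nil => simp
    | cons y rest' ih =>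
      rcases List.pairwise_cons.mp h with ⟨hx, hyr⟩
      by_cases hyx : (y == x) = true
      · have hy : y = x := beq_iff_eq.mp hyx
        subst hy
        simp only [List.dropWhile, hyx]
        exact ih (List.pairwise_cons.mpr ⟨fun z hz => hx z (List.mem_cons_of_mem _ hz),
          (List.pairwise_cons.mp hyr).2⟩)
      · simp only [List.dropWhile, hyx]
        intro hmem
        rcases List.mem_cons.mp hmem with heq | hmem'
        · exact hyx (by simp [heq])
        · have h1 : y ≤ x := (List.pairwise_cons.mp hyr).1 x hmem'
          have h2 : x ≤ y := hx y (List.mem_cons_self)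
          exact hyx (by simp [le_antisymm h1 h2])
  refine ⟨hnm, ?_⟩
  have hsplit := List.takeWhile_append_dropWhile (p := fun y => y == x) (l := rest)
  have htk : (rest.takeWhile (fun y => y == x)).count x =
      (rest.takeWhile (fun y => y == x)).length := by
    apply List.count_eq_length.mpr
    intro b hb
    have := List.mem_takeWhile_imp hb
    simp [beq_iff_eq.mp this]
  have hdp : (rest.dropWhile (fun y => y == x)).count x = 0 := List.count_eq_zero.mpr hnm
  have hr : rest.count x = (rest.takeWhile (fun y => y == x)).length := by
    conv_lhs => rw [← List.takeWhile_append_dropWhile (p := fun y => y == x) (l := rest)]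
    rw [List.count_append, htk, hdp]
    omega
  simp [List.count_cons_self, hr]

theorem pvRunFlag_sorted (ys : List String) (h : ys.Pairwise (· ≤ ·)) :
    pvRunFlag ys = pvHasCount4 ys := by
  induction ys using pvRunFlag.induct with
  | case1 => simp [pvRunFlag, pvHasCount4]
  | case2 x rest hrun =>
    rw [pvRunFlag, if_pos hrun]
    have h4 : (rest.takeWhile (fun y => y == x)).length + 1 = 4 := by simpa using hrun
    symm
    rw [pvHasCount4]
    apply List.any_eq_true.mpr
    exact ⟨x, List.mem_cons_self, by simp [(pvCount_head_run x rest h).2, h4]⟩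
  | case3 x rest hrun ih =>
    rcases pvCount_head_run x rest h with ⟨hnm, hcx⟩
    set run := rest.takeWhile (fun y => y == x) with hrundef
    set tl := rest.dropWhile (fun y => y == x) with htldef
    have htl_pw : tl.Pairwise (· ≤ ·) := h.sublist ((List.dropWhile_sublist _).cons _)
    rw [pvRunFlag, if_neg hrun, ih htl_pw]
    -- both sides as existence of an exact-4 name
    apply Bool.eq_iff_iff.mpr
    unfold pvHasCount4
    simp only [List.any_eq_true, beq_iff_eq]
    have hsplit : x :: rest = x :: (run ++ tl) := by
      rw [hrundef, htldef]
      exact congrArg (x :: ·) (List.takeWhile_append_dropWhile).symm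
    have hcount_tl : ∀ z ∈ tl, (x :: rest).count z = tl.count z := by
      intro z hz
      have hzx : z ≠ x := fun he => hnm (he ▸ hz)
      have hcrun : run.count z = 0 := by
        apply List.count_eq_zero.mpr
        intro hmem
        have hmem' : z ∈ rest.takeWhile (fun y => y == x) := hrundef ▸ hmem
        exact hzx (beq_iff_eq.mp (List.mem_takeWhile_imp (p := fun y => y == x) hmem'))
      rw [hsplit]
      simp [List.count_append, hcrun, Ne.symm hzx]
    have hx4 : (x :: rest).count x ≠ 4 := by
      rw [hcx]
      intro he
      apply hrun
      simp [he]
    constructor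
    · rintro ⟨z, hz, h4⟩
      refine ⟨z, ?_, ?_⟩
      · rw [hsplit]; exact List.mem_cons_of_mem _ (List.mem_append_right _ hz)
      · rw [hcount_tl z hz]; exact h4
    · rintro ⟨z, hz, h4⟩
      rw [hsplit] at hz
      rcases List.mem_cons.mp hz with heq | hz'
      · exact absurd (heq ▸ h4) hx4
      · rcases List.mem_append.mp hz' with hzr | hzt
        · have hzr' : z ∈ rest.takeWhile (fun y => y == x) := hrundef ▸ hzr
          have : z = x := beq_iff_eq.mp (List.mem_takeWhile_imp (p := fun y => y == x) hzr')
          exact absurd (this ▸ h4) hx4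
        · exact ⟨z, hzt, by rw [← hcount_tl z hzt]; exact h4⟩

theorem pvHasCount4_perm {xs ys : List String} (h : xs.Perm ys) :
    pvHasCount4 xs = pvHasCount4 ys := by
  unfold pvHasCount4
  apply Bool.eq_iff_iff.mpr
  simp only [List.any_eq_true, beq_iff_eq]
  constructor
  · rintro ⟨z, hz, h4⟩; exact ⟨z, h.mem_iff.mp hz, by rw [← h.count_eq]; exact h4⟩
  · rintro ⟨z, hz, h4⟩; exact ⟨z, h.mem_iff.mpr hz, by rw [h.count_eq]; exact h4⟩

theorem pvHayRun4_eq (xs : List String) : pvHayRun4 xs = pvHasCount4 xs := by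
  rw [pvHayRun4, pvRunFlag_sorted _ (PySem.List.sorted_pairwise xs (fun x => x)),
    pvHasCount4_perm (PySem.List.sorted_perm xs (fun x => x) false)]

theorem pvFoldl_append_eq_map {α β : Type} (l : List α) (f : α → β) :
    l.foldl (fun acc x => acc ++ [f x]) [] = l.map f := by
  have aux : ∀ (l : List α) (acc : List β), l.foldl (fun acc x => acc ++ [f x]) acc = acc ++ l.map f := by
    intro l
    induction l with
    | nil => intro acc; simp
    | cons x t ih => intro acc; simp [List.foldl_cons, ih]
  simpa using aux l []

-- ===== VERDICT (by name: the statement is the Claim_ definition above) =====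
theorem un_responsable_por_turno_spec : Claim_equal_un_responsable_por_turno := by
  intro g _ _
  unfold Spec_un_responsable_por_turno un_responsable_por_turno un_responsable_por_turno_alt
  simp only [pvCountLoop_eq_counter, pvScan4_counter, ← pvHayRun4_eq]
  rw [← pvFoldl_append_eq_map]
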